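-- pv_equiv track=rewrite | github.com/vileproj6/502v200 | src/services/avatar_dashboard_generator.py | _map_pain_intensity
-- ===== SOURCE A (Python) =====
-- from typing import Dict, List, Any, Optional
--
-- def _map_pain_intensity(dores: List[str]) -> Dict[str, List[str]]:
--     """Mapeia intensidade das dores"""
--
--     alta_intensidade = []
--     media_intensidade = []
--     baixa_intensidade = []
--
--     for dor in dores:
--         if any(word in dor.lower() for word in ['excessivamente', 'sempre', 'nunca', 'constantemente']):
--             alta_intensidade.append(dor)
--         elif any(word in dor.lower() for word in ['frequentemente', 'muitas vezes', 'geralmente']):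
--             media_intensidade.append(dor)
--         else:
--             baixa_intensidade.append(dor)
--
--     return {
--         'alta_intensidade': alta_intensidade,
--         'media_intensidade': media_intensidade,
--         'baixa_intensidade': baixa_intensidade
--     }
-- ===== SOURCE B (Python) =====
-- from typing import Dict, List
--
-- _HIGH = ['excessivamente', 'sempre', 'nunca', 'constantemente']
-- _MED = ['frequentemente', 'muitas vezes', 'geralmente']
--
-- def _is_high(dor: str) -> bool:
--     return any(word in dor.lower() for word in _HIGH)
--
-- def _is_med(dor: str) -> bool:
--     return any(word in dor.lower() for word in _MED)
--
-- def _map_pain_intensity(dores: List[str]) -> Dict[str, List[str]]: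
--     """Mapeia intensidade das dores"""
--     return {
--         'alta_intensidade': [d for d in dores if _is_high(d)],
--         'media_intensidade': [d for d in dores if _is_med(d) and not _is_high(d)],
--         'baixa_intensidade': [d for d in dores if not _is_high(d) and not _is_med(d)]
--     }
-- ===== Notes on version B (the rewrite author's own statement) =====
-- stated objective: alternative
-- what changed: Replaces the single loop with three mutable accumulators by three independent filtering comprehensions over dores (high / medium-and-not-high / neither), preserving order and precedence.
import Mathlib
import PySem

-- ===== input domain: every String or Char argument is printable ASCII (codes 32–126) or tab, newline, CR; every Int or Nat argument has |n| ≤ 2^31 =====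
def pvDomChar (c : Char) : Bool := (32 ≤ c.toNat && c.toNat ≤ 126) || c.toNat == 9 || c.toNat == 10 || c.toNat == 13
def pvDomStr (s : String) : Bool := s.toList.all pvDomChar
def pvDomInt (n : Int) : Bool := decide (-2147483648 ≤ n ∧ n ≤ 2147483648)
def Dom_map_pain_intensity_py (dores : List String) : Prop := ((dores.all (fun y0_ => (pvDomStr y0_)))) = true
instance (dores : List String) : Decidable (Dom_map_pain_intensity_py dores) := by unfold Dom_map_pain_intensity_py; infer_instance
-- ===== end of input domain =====

-- B replaces A's single loop with three mutable accumulators by three independent filtering passes (alternative decomposition, same cost).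
-- ===== PORT A =====
def map_pain_intensity_py (dores : List String) : List (String × List String) :=
  let r := dores.foldl (fun (acc : List String × List String × List String) dor =>
    let (alta, media, baixa) := acc
    if (["excessivamente", "sempre", "nunca", "constantemente"].any
        (fun word => PySem.Str.isIn word (PySem.Str.lower dor))) then
      (alta ++ [dor], media, baixa)
    else if (["frequentemente", "muitas vezes", "geralmente"].any
        (fun word => PySem.Str.isIn word (PySem.Str.lower dor))) then
      (alta, media ++ [dor], baixa)
    else
      (alta, media, baixa ++ [dor])) ([], [], [])
  [("alta_intensidade", r.1), ("media_intensidade", r.2.1), ("baixa_intensidade", r.2.2)]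

-- ===== PORT B =====
def pvIsHigh (dor : String) : Bool :=
  ["excessivamente", "sempre", "nunca", "constantemente"].any
    (fun word => PySem.Str.isIn word (PySem.Str.lower dor))

def pvIsMed (dor : String) : Bool :=
  ["frequentemente", "muitas vezes", "geralmente"].any
    (fun word => PySem.Str.isIn word (PySem.Str.lower dor))

def map_pain_intensity_py_alt (dores : List String) : List (String × List String) :=
  [("alta_intensidade", dores.filter (fun d => pvIsHigh d)),
   ("media_intensidade", dores.filter (fun d => pvIsMed d && !pvIsHigh d)),
   ("baixa_intensidade", dores.filter (fun d => !pvIsHigh d && !pvIsMed d))]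

-- ===== PRECONDITION & SPEC =====
def Spec_map_pain_intensity_py (dores : List String) (out : List (String × List String)) : Prop := out = map_pain_intensity_py_alt dores
instance (dores : List String) (out : List (String × List String)) : Decidable (Spec_map_pain_intensity_py dores out) := by unfold Spec_map_pain_intensity_py; infer_instance

-- ===== CLAIM (what is proved, stated in full; the proofs are below) =====
def Claim_equal_map_pain_intensity_py : Prop := ∀ (dores : List String), Dom_map_pain_intensity_py dores → Spec_map_pain_intensity_py dores (map_pain_intensity_py dores)

-- ===== LEMMAS AND PROOFS =====
lemma pv_loop_inv (l : List String) (a m b : List String) :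
    l.foldl (fun (acc : List String × List String × List String) dor =>
      let (alta, media, baixa) := acc
      if (["excessivamente", "sempre", "nunca", "constantemente"].any
          (fun word => PySem.Str.isIn word (PySem.Str.lower dor))) then
        (alta ++ [dor], media, baixa)
      else if (["frequentemente", "muitas vezes", "geralmente"].any
          (fun word => PySem.Str.isIn word (PySem.Str.lower dor))) then
        (alta, media ++ [dor], baixa)
      else
        (alta, media, baixa ++ [dor])) (a, m, b)
    = (a ++ l.filter (fun d => pvIsHigh d),
       m ++ l.filter (fun d => pvIsMed d && !pvIsHigh d),
       b ++ l.filter (fun d => !pvIsHigh d && !pvIsMed d)) := by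
  induction l generalizing a m b with
  | nil => simp
  | cons x xs ih =>
    have hfc : ∀ (p : String → Bool) (ys : List String),
        List.filter p (x :: ys) = if p x = true then x :: List.filter p ys else List.filter p ys := by
      intro p ys; simp [List.filter_cons]
    simp only [List.foldl_cons]
    by_cases hH : pvIsHigh x = true
    · have hc : (["excessivamente", "sempre", "nunca", "constantemente"].any
          (fun word => PySem.Str.isIn word (PySem.Str.lower x))) = true := hH
      rw [show (List.foldl _ (if (["excessivamente", "sempre", "nunca", "constantemente"].any
          (fun word => PySem.Str.isIn word (PySem.Str.lower x))) then (a ++ [x], m, b)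
          else if (["frequentemente", "muitas vezes", "geralmente"].any
          (fun word => PySem.Str.isIn word (PySem.Str.lower x))) then (a, m ++ [x], b)
          else (a, m, b ++ [x])) xs : List String × List String × List String) =
          List.foldl _ (a ++ [x], m, b) xs from by rw [if_pos hc]]
      rw [ih, hfc pvIsHigh, hfc (fun d => pvIsMed d && !pvIsHigh d),
          hfc (fun d => !pvIsHigh d && !pvIsMed d)]
      simp [hH]
    · have hc : ¬ (["excessivamente", "sempre", "nunca", "constantemente"].any
          (fun word => PySem.Str.isIn word (PySem.Str.lower x))) = true := hH
      by_cases hM : pvIsMed x = true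
      · have hc2 : (["frequentemente", "muitas vezes", "geralmente"].any
            (fun word => PySem.Str.isIn word (PySem.Str.lower x))) = true := hM
        rw [show (List.foldl _ (if (["excessivamente", "sempre", "nunca", "constantemente"].any
            (fun word => PySem.Str.isIn word (PySem.Str.lower x))) then (a ++ [x], m, b)
            else if (["frequentemente", "muitas vezes", "geralmente"].any
            (fun word => PySem.Str.isIn word (PySem.Str.lower x))) then (a, m ++ [x], b)
            else (a, m, b ++ [x])) xs : List String × List String × List String) =
            List.foldl _ (a, m ++ [x], b) xs from by rw [if_neg hc, if_pos hc2]]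
        rw [ih, hfc pvIsHigh, hfc (fun d => pvIsMed d && !pvIsHigh d),
            hfc (fun d => !pvIsHigh d && !pvIsMed d)]
        simp [hH, hM]
      · have hc2 : ¬ (["frequentemente", "muitas vezes", "geralmente"].any
            (fun word => PySem.Str.isIn word (PySem.Str.lower x))) = true := hM
        rw [show (List.foldl _ (if (["excessivamente", "sempre", "nunca", "constantemente"].any
            (fun word => PySem.Str.isIn word (PySem.Str.lower x))) then (a ++ [x], m, b)
            else if (["frequentemente", "muitas vezes", "geralmente"].any
            (fun word => PySem.Str.isIn word (PySem.Str.lower x))) then (a, m ++ [x], b)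
            else (a, m, b ++ [x])) xs : List String × List String × List String) =
            List.foldl _ (a, m, b ++ [x]) xs from by rw [if_neg hc, if_neg hc2]]
        rw [ih, hfc pvIsHigh, hfc (fun d => pvIsMed d && !pvIsHigh d),
            hfc (fun d => !pvIsHigh d && !pvIsMed d)]
        simp [hH, hM]

-- ===== VERDICT (by name: the statement is the Claim_ definition above) =====
theorem map_pain_intensity_py_spec : Claim_equal_map_pain_intensity_py := by
  intro dores _
  unfold Spec_map_pain_intensity_py map_pain_intensity_py map_pain_intensity_py_alt
  rw [pv_loop_inv]
  simp
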